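-- pv_equiv track=rewrite | github.com/jukanntenn/fa | fa/task/storage.py | parse_id_range
-- ===== SOURCE A (Python) =====
-- def parse_id_range(value: str) -> list[int]:
--     ids: set[int] = set()
--     for piece in value.split(","):
--         item = piece.strip()
--         if not item:
--             continue
--         if "-" in item:
--             start_raw, end_raw = item.split("-", 1)
--             start, end = int(start_raw), int(end_raw)
--             ids.update(range(start, end + 1))
--         else:
--             ids.add(int(item))
--     return sorted(ids)
-- ===== SOURCE B (Python) =====
-- def parse_id_range(value: str) -> list[int]:
--     intervals = []
--     for piece in value.split(","):
--         item = piece.strip()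
--         if not item:
--             continue
--         if "-" in item:
--             start_raw, end_raw = item.split("-", 1)
--             lo, hi = int(start_raw), int(end_raw)
--         else:
--             lo = hi = int(item)
--         if lo <= hi:
--             intervals.append((lo, hi))
--     intervals.sort()
--     merged = []
--     for lo, hi in intervals:
--         if merged and lo <= merged[-1][1] + 1:
--             if hi > merged[-1][1]:
--                 merged[-1] = (merged[-1][0], hi)
--         else:
--             merged.append((lo, hi))
--     result = []
--     for lo, hi in merged:
--         result.extend(range(lo, hi + 1))
--     return result
-- ===== Notes on version B (the rewrite author's own statement) =====
-- stated objective: alternative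
-- what changed: B records each piece as an interval instead of expanding it into a set, then sorts the intervals, merges overlapping/adjacent ones, and emits the merged ranges directly, producing the sorted deduplicated list without a set or a final sort of ids.
import Mathlib
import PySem

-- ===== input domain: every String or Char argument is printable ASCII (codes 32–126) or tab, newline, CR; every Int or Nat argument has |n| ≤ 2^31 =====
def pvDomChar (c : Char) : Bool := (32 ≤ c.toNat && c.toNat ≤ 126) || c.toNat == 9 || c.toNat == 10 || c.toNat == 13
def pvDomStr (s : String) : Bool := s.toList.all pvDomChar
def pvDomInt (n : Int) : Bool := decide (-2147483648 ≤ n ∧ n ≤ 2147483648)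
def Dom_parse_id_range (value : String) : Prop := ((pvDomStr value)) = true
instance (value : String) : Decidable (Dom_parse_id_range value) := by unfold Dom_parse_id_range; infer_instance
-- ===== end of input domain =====

-- B replaces A's expand-into-a-set-then-sort with interval collection, sort and merge, emitting the
-- already-sorted deduplicated output directly (objective: alternative algorithm).

-- ===== PORT A =====
def pvAStep (ids : PySem.Set Int) (piece : String) : Option (PySem.Set Int) :=
  let item := PySem.Str.strip piece
  if item = "" then some ids
  else if PySem.Str.isIn "-" item then
    match (PySem.Str.splitMax? item "-" 1).getD [] with
    | startRaw :: endRaw :: _ =>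
      match PySem.Int.ofStr? startRaw, PySem.Int.ofStr? endRaw with
      | some s, some e => some (PySem.Set.update ids (PySem.List.pyRange s (e + 1) 1))
      | _, _ => none
    | _ => none
  else
    match PySem.Int.ofStr? item with
    | some n => some (PySem.Set.add ids n)
    | none => none

def pvALoop : List String → PySem.Set Int → Option (PySem.Set Int)
  | [], ids => some ids
  | piece :: rest, ids =>
    match pvAStep ids piece with
    | some ids' => pvALoop rest ids'
    | none => none

def parse_id_range (value : String) : List Int :=
  match pvALoop ((PySem.Str.split? value ",").getD []) PySem.Set.empty with
  | some ids => PySem.List.sorted ids (fun x => x) false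
  | none => []

-- ===== PORT B =====
def pvBParse (item : String) : Option (Int × Int) :=
  if PySem.Str.isIn "-" item then
    match (PySem.Str.splitMax? item "-" 1).getD [] with
    | startRaw :: endRaw :: _ =>
      match PySem.Int.ofStr? startRaw, PySem.Int.ofStr? endRaw with
      | some lo, some hi => some (lo, hi)
      | _, _ => none
    | _ => none
  else
    match PySem.Int.ofStr? item with
    | some n => some (n, n)
    | none => none

def pvBCollect : List String → List (Int × Int) → Option (List (Int × Int))
  | [], acc => some acc
  | piece :: rest, acc =>
    let item := PySem.Str.strip piece
    if item = "" then pvBCollect rest acc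
    else
      match pvBParse item with
      | some (lo, hi) => pvBCollect rest (if lo ≤ hi then acc ++ [(lo, hi)] else acc)
      | none => none

-- Python's `merged` list is kept reversed here (head = merged[-1]); reversed before emission.
def pvBMergeStep (mergedRev : List (Int × Int)) (iv : Int × Int) : List (Int × Int) :=
  match mergedRev with
  | (mlo, mhi) :: rest =>
    if iv.1 ≤ mhi + 1 then
      if mhi < iv.2 then (mlo, iv.2) :: rest else (mlo, mhi) :: rest
    else iv :: (mlo, mhi) :: rest
  | [] => [iv]

def parse_id_range_alt (value : String) : List Int :=
  match pvBCollect ((PySem.Str.split? value ",").getD []) [] with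
  | some intervals =>
    let sortedIvs := PySem.List.sorted2 intervals (fun p => p.1) (fun p => p.2) false
    let merged := (sortedIvs.foldl pvBMergeStep []).reverse
    merged.foldl (fun r p => r ++ PySem.List.pyRange p.1 (p.2 + 1) 1) []
  | none => []

-- ===== PRECONDITION & SPEC =====
-- Pre_ excludes exactly the inputs where Python's int() raises ValueError (a non-integer piece,
-- including any lone negative number, whose "-" is taken as a range separator).
def pvPieceOk (piece : String) : Bool :=
  let item := PySem.Str.strip piece
  if item = "" then true
  else if PySem.Str.isIn "-" item then
    match (PySem.Str.splitMax? item "-" 1).getD [] with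
    | a :: b :: _ => (PySem.Int.ofStr? a).isSome && (PySem.Int.ofStr? b).isSome
    | _ => false
  else (PySem.Int.ofStr? item).isSome

def Pre_parse_id_range (value : String) : Prop :=
  ((PySem.Str.split? value ",").getD []).all pvPieceOk = true
instance (value : String) : Decidable (Pre_parse_id_range value) := by
  unfold Pre_parse_id_range; infer_instance

def pvWitness_parse_id_range : String := "4-6, 2 ,9,5-3"

def Spec_parse_id_range (value : String) (out : List Int) : Prop := out = parse_id_range_alt value
instance (value : String) (out : List Int) : Decidable (Spec_parse_id_range value out) := by unfold Spec_parse_id_range; infer_instance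

-- ===== CLAIM (what is proved, stated in full; the proofs are below) =====
def Claim_equal_parse_id_range : Prop := ∀ (value : String), Dom_parse_id_range value → Pre_parse_id_range value → Spec_parse_id_range value (parse_id_range value)

-- ===== LEMMAS AND PROOFS =====

-- x is covered by one of the intervals
def pvCov (l : List (Int × Int)) (x : Int) : Prop := ∃ p ∈ l, p.1 ≤ x ∧ x ≤ p.2

lemma pvCov_nil (x : Int) : ¬ pvCov [] x := by simp [pvCov]

lemma pvCov_cons (q : Int × Int) (t : List (Int × Int)) (x : Int) :
    pvCov (q :: t) x ↔ (q.1 ≤ x ∧ x ≤ q.2) ∨ pvCov t x := by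
  constructor
  · rintro ⟨p, hp, h⟩
    rcases List.mem_cons.mp hp with rfl | hp
    · exact Or.inl h
    · exact Or.inr ⟨p, hp, h⟩
  · rintro (h | ⟨p, hp, h⟩)
    · exact ⟨q, List.mem_cons_self .., h⟩
    · exact ⟨p, List.mem_cons_of_mem _ hp, h⟩

lemma pvCov_append (l₁ l₂ : List (Int × Int)) (x : Int) :
    pvCov (l₁ ++ l₂) x ↔ pvCov l₁ x ∨ pvCov l₂ x := by
  constructor
  · rintro ⟨p, hp, h⟩
    rcases List.mem_append.mp hp with hp | hp
    · exact Or.inl ⟨p, hp, h⟩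
    · exact Or.inr ⟨p, hp, h⟩
  · rintro (⟨p, hp, h⟩ | ⟨p, hp, h⟩)
    · exact ⟨p, List.mem_append_left _ hp, h⟩
    · exact ⟨p, List.mem_append_right _ hp, h⟩

lemma pvCov_of_perm {l₁ l₂ : List (Int × Int)} (h : l₁.Perm l₂) (x : Int) :
    pvCov l₁ x ↔ pvCov l₂ x := by
  constructor <;> rintro ⟨p, hp, h1, h2⟩
  · exact ⟨p, h.mem_iff.mp hp, h1, h2⟩
  · exact ⟨p, h.mem_iff.mpr hp, h1, h2⟩

-- joint induction over the pieces: A's set has exactly the elements covered by B's interval list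
lemma pvParseJoin : ∀ (ps : List String) (ids : PySem.Set Int) (acc : List (Int × Int)),
    ps.all pvPieceOk = true → ids.Nodup → (∀ x, x ∈ ids ↔ pvCov acc x) →
    (∀ p ∈ acc, p.1 ≤ p.2) →
    ∃ ids' acc', pvALoop ps ids = some ids' ∧ pvBCollect ps acc = some acc' ∧
      ids'.Nodup ∧ (∀ x, x ∈ ids' ↔ pvCov acc' x) ∧ (∀ p ∈ acc', p.1 ≤ p.2) := by
  intro ps
  induction ps with
  | nil => intro ids acc _ hnd hmem hle; exact ⟨ids, acc, rfl, rfl, hnd, hmem, hle⟩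
  | cons piece rest ih =>
    intro ids acc hall hnd hmem hle
    simp only [List.all_cons, Bool.and_eq_true] at hall
    obtain ⟨hok, hrest⟩ := hall
    simp only [pvALoop, pvBCollect, pvAStep]
    unfold pvPieceOk at hok
    by_cases hempty : PySem.Str.strip piece = ""
    · simp only [hempty, reduceIte]
      exact ih ids acc hrest hnd hmem hle
    · simp only [if_neg hempty] at hok ⊢
      by_cases hdash : PySem.Str.isIn "-" (PySem.Str.strip piece) = true
      · simp only [hdash, pvBParse, reduceIte] at hok ⊢
        cases hsp : (PySem.Str.splitMax? (PySem.Str.strip piece) "-" 1).getD [] with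
        | nil => rw [hsp] at hok; simp at hok
        | cons a t =>
          cases t with
          | nil => rw [hsp] at hok; simp at hok
          | cons b t2 =>
            rw [hsp] at hok
            simp only [Bool.and_eq_true, Option.isSome_iff_exists] at hok
            obtain ⟨⟨s, hs⟩, ⟨e, he⟩⟩ := hok
            simp only [hs, he]
            refine ih _ _ hrest (PySem.Set.nodup_update _ _ hnd) ?_ ?_
            · intro x
              rw [PySem.Set.mem_update, PySem.List.mem_pyRange_one, hmem]
              by_cases hse : s ≤ e
              · simp only [if_pos hse, pvCov_append, pvCov_cons]
                constructor
                · rintro (h | h)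
                  · exact Or.inl h
                  · exact Or.inr (Or.inl ⟨h.1, by omega⟩)
                · rintro (h | (h | h))
                  · exact Or.inl h
                  · exact Or.inr ⟨h.1, by omega⟩
                  · exact absurd h (pvCov_nil x)
              · simp only [if_neg hse]
                constructor
                · rintro (h | h)
                  · exact h
                  · omega
                · exact Or.inl
            · intro p hp
              by_cases hse : s ≤ e
              · simp only [if_pos hse, List.mem_append, List.mem_singleton] at hp
                rcases hp with hp | hp
                · exact hle p hp
                · subst hp; exact hse
              · simp only [if_neg hse] at hp; exact hle p hp
      · rw [Bool.not_eq_true] at hdash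
        simp only [hdash, Bool.false_eq_true, pvBParse, reduceIte] at hok ⊢
        rw [Option.isSome_iff_exists] at hok
        obtain ⟨n, hn⟩ := hok
        simp only [hn]
        refine ih _ _ hrest (PySem.Set.nodup_add _ _ hnd) ?_ ?_
        · intro x
          rw [PySem.Set.mem_add, hmem]
          simp only [if_pos (le_refl n), pvCov_append, pvCov_cons]
          constructor
          · rintro (h | h)
            · exact Or.inl h
            · exact Or.inr (Or.inl (by omega))
          · rintro (h | (h | h))
            · exact Or.inl h
            · exact Or.inr (by omega)
            · exact absurd h (pvCov_nil x)
        · intro p hp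
          simp only [if_pos (le_refl n), List.mem_append, List.mem_singleton] at hp
          rcases hp with hp | hp
          · exact hle p hp
          · subst hp; exact le_refl n

-- inserting with an asymmetric, transitive 'before' keeps the list 'before'-free in order
lemma pvPairwise_insertBy {α : Type} (before : α → α → Bool)
    (hasym : ∀ a b, before a b = true → before b a = false)
    (htrans : ∀ a b c, before a b = true → before b c = true → before a c = true)
    (x : α) : ∀ (ys : List α), ys.Pairwise (fun a b => before b a = false) →
    (PySem.List.insertBy before x ys).Pairwise (fun a b => before b a = false) := by
  intro ys
  induction ys with
  | nil => intro _; simp [PySem.List.insertBy]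
  | cons y t ih =>
    intro h
    rw [List.pairwise_cons] at h
    obtain ⟨hy, ht⟩ := h
    show (if before x y = true then x :: y :: t else y :: PySem.List.insertBy before x t).Pairwise _
    by_cases hxy : before x y = true
    · simp only [if_pos hxy]
      refine List.Pairwise.cons ?_ (List.Pairwise.cons hy ht)
      intro z hz
      rcases List.mem_cons.mp hz with rfl | hz
      · exact hasym _ _ hxy
      · by_cases hzx : before z x = true
        · have := htrans _ _ _ hzx hxy
          rw [hy z hz] at this; exact absurd this (by simp)
        · simpa using hzx
    · simp only [if_neg hxy]
      refine List.Pairwise.cons ?_ (ih ht)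
      intro z hz
      rcases (PySem.List.mem_insertBy _ _ _ _).mp hz with rfl | hz
      · simpa using hxy
      · exact hy z hz
lemma pvPairwise_foldl_insertBy {α : Type} (before : α → α → Bool)
    (hasym : ∀ a b, before a b = true → before b a = false)
    (htrans : ∀ a b c, before a b = true → before b c = true → before a c = true) :
    ∀ (l acc : List α), acc.Pairwise (fun a b => before b a = false) →
    (l.foldl (fun a x => PySem.List.insertBy before x a) acc).Pairwise
      (fun a b => before b a = false) := by
  intro l
  induction l with
  | nil => intro acc h; exact h
  | cons x t ih =>
    intro acc h
    exact ih _ (pvPairwise_insertBy before hasym htrans x acc h)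

-- the concrete comparison used by sorted2 on pairs with fst/snd keys
def pvBefore (a b : Int × Int) : Bool :=
  decide (a.1 < b.1) || (!decide (b.1 < a.1) && decide (a.2 < b.2))

lemma pvBefore_iff (a b : Int × Int) :
    pvBefore a b = true ↔ (a.1 < b.1 ∨ (¬ b.1 < a.1 ∧ a.2 < b.2)) := by
  simp [pvBefore]

lemma pvBefore_false_iff (a b : Int × Int) :
    pvBefore a b = false ↔ ¬ (a.1 < b.1 ∨ (¬ b.1 < a.1 ∧ a.2 < b.2)) := by
  rw [Bool.eq_false_iff, Ne, pvBefore_iff]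

lemma pvSorted2_pairwise_fst (l : List (Int × Int)) :
    (PySem.List.sorted2 l (fun p => p.1) (fun p => p.2) false).Pairwise
      (fun a b => a.1 ≤ b.1) := by
  have h : (PySem.List.sorted2 l (fun p => p.1) (fun p => p.2) false).Pairwise
      (fun a b => pvBefore b a = false) := by
    show (l.foldl (fun a x => PySem.List.insertBy pvBefore x a) []).Pairwise _
    refine pvPairwise_foldl_insertBy pvBefore ?_ ?_ l [] (by simp)
    · intro a b hab
      rw [pvBefore_iff] at hab
      rw [pvBefore_false_iff]
      omega
    · intro a b c hab hbc
      rw [pvBefore_iff] at hab hbc ⊢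
      omega
  refine h.imp ?_
  intro a b hab
  rw [pvBefore_false_iff] at hab
  omega

-- the merge loop: keeps intervals nonempty, gap-separated (reversed order), and covers
-- exactly the old coverage plus the coverage of the consumed input
lemma pvMergeGo : ∀ (l mrev : List (Int × Int)),
    (∀ p ∈ l, p.1 ≤ p.2) → l.Pairwise (fun a b => a.1 ≤ b.1) →
    (∀ p ∈ mrev, p.1 ≤ p.2) → mrev.Pairwise (fun a b => b.2 + 1 < a.1) →
    (∀ q, mrev.head? = some q → ∀ p ∈ l, q.1 ≤ p.1) →
    (∀ p ∈ l.foldl pvBMergeStep mrev, p.1 ≤ p.2) ∧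
    (l.foldl pvBMergeStep mrev).Pairwise (fun a b => b.2 + 1 < a.1) ∧
    (∀ x, pvCov (l.foldl pvBMergeStep mrev) x ↔ pvCov mrev x ∨ pvCov l x) := by
  intro l
  induction l with
  | nil =>
    intro mrev _ _ hle hpw _
    exact ⟨hle, hpw, fun x => by simp [pvCov_nil]⟩
  | cons p t ih =>
    intro mrev hl hlpw hle hpw hhd
    simp only [List.pairwise_cons] at hlpw
    obtain ⟨hpt, htpw⟩ := hlpw
    have hp : p.1 ≤ p.2 := hl p (List.mem_cons_self ..)
    have hlt : ∀ q ∈ t, q.1 ≤ q.2 := fun q hq => hl q (List.mem_cons_of_mem _ hq)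
    rw [List.foldl_cons]
    cases mrev with
    | nil =>
      have hstep : pvBMergeStep [] p = [p] := rfl
      rw [hstep]
      have := ih [p] hlt htpw
        (by intro q hq; rw [List.mem_singleton] at hq; subst hq; exact hp)
        (List.pairwise_singleton _ _)
        (by
          intro q hq q' hq'
          rw [List.head?_cons, Option.some.injEq] at hq
          subst hq
          exact hpt q' hq')
      refine ⟨this.1, this.2.1, fun x => ?_⟩
      rw [this.2.2 x, pvCov_cons, pvCov_cons]
      simp only [pvCov_nil, or_false, false_or]
    | cons m rest =>
      obtain ⟨mlo, mhi⟩ := m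
      have hm : mlo ≤ mhi := by simpa using hle (mlo, mhi) (List.mem_cons_self ..)
      have hmlo : mlo ≤ p.1 := hhd (mlo, mhi) rfl p (List.mem_cons_self ..)
      rw [List.pairwise_cons] at hpw
      obtain ⟨hgap, hpwr⟩ := hpw
      by_cases h1 : p.1 ≤ mhi + 1
      · by_cases h2 : mhi < p.2
        · have hstep : pvBMergeStep ((mlo, mhi) :: rest) p = (mlo, p.2) :: rest := by
            simp [pvBMergeStep, h1, h2]
          rw [hstep]
          have := ih ((mlo, p.2) :: rest)  hlt htpw
            (by
              intro q hq
              rcases List.mem_cons.mp hq with rfl | hq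
              · simp; omega
              · exact hle q (List.mem_cons_of_mem _ hq))
            (List.Pairwise.cons (by simpa using hgap) hpwr)
            (by
              intro q hq q' hq'
              rw [List.head?_cons, Option.some.injEq] at hq
              subst hq
              exact le_trans hmlo (hpt q' hq'))
          refine ⟨this.1, this.2.1, fun x => ?_⟩
          rw [this.2.2 x, pvCov_cons, pvCov_cons, pvCov_cons]
          simp only
          constructor
          · rintro ((h | h) | h)
            · by_cases hx : x ≤ mhi
              · exact Or.inl (Or.inl ⟨h.1, hx⟩)
              · exact Or.inr (Or.inl ⟨by omega, h.2⟩)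
            · exact Or.inl (Or.inr h)
            · exact Or.inr (Or.inr h)
          · rintro ((h | h) | (h | h))
            · exact Or.inl (Or.inl ⟨h.1, by omega⟩)
            · exact Or.inl (Or.inr h)
            · exact Or.inl (Or.inl ⟨by omega, by omega⟩)
            · exact Or.inr h
        · have hstep : pvBMergeStep ((mlo, mhi) :: rest) p = (mlo, mhi) :: rest := by
            simp [pvBMergeStep, h1, h2]
          rw [hstep]
          have := ih ((mlo, mhi) :: rest) hlt htpw hle
            (List.Pairwise.cons hgap hpwr)
            (by
              intro q hq q' hq'
              rw [List.head?_cons, Option.some.injEq] at hq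
              subst hq
              exact le_trans hmlo (hpt q' hq'))
          refine ⟨this.1, this.2.1, fun x => ?_⟩
          rw [this.2.2 x, pvCov_cons, pvCov_cons]
          constructor
          · rintro (h | h)
            · exact Or.inl h
            · exact Or.inr (Or.inr h)
          · rintro ((h | h) | (h | h))
            · exact Or.inl (Or.inl h)
            · exact Or.inl (Or.inr h)
            · exact Or.inl (Or.inl ⟨by omega, by omega⟩)
            · exact Or.inr h
      · have hstep : pvBMergeStep ((mlo, mhi) :: rest) p = p :: (mlo, mhi) :: rest := by
          simp [pvBMergeStep, h1]
        rw [hstep]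
        have := ih (p :: (mlo, mhi) :: rest) hlt htpw
          (by
            intro q hq
            rcases List.mem_cons.mp hq with rfl | hq
            · exact hp
            · exact hle q hq)
          (by
            refine List.Pairwise.cons ?_ (List.Pairwise.cons hgap hpwr)
            intro q hq
            rcases List.mem_cons.mp hq with rfl | hq
            · omega
            · have := hgap q hq; omega)
          (by
            intro q hq q' hq'
            rw [List.head?_cons, Option.some.injEq] at hq
            subst hq
            exact hpt q' hq')
        refine ⟨this.1, this.2.1, fun x => ?_⟩
        rw [this.2.2 x]
        simp only [pvCov_cons]
        tauto

-- emission of a gap-separated chain is strictly increasing and covers exactly the chain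
lemma pvEmit : ∀ (m : List (Int × Int)),
    (∀ p ∈ m, p.1 ≤ p.2) → m.Pairwise (fun a b => a.2 + 1 < b.1) →
    (m.flatMap (fun p => PySem.List.pyRange p.1 (p.2 + 1) 1)).Pairwise (· < ·) ∧
    (∀ x, x ∈ m.flatMap (fun p => PySem.List.pyRange p.1 (p.2 + 1) 1) ↔ pvCov m x) := by
  intro m
  induction m with
  | nil => simp [pvCov_nil]
  | cons p t ih =>
    intro hle hpw
    rw [List.pairwise_cons] at hpw
    obtain ⟨hgap, hpwt⟩ := hpw
    have iht := ih (fun q hq => hle q (List.mem_cons_of_mem _ hq)) hpwt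
    rw [List.flatMap_cons]
    constructor
    · rw [List.pairwise_append]
      refine ⟨PySem.List.pairwise_lt_pyRange_one _ _, iht.1, ?_⟩
      intro a ha b hb
      rw [PySem.List.mem_pyRange_one] at ha
      rw [iht.2 b] at hb
      obtain ⟨q, hq, hb1, _⟩ := hb
      have := hgap q hq
      omega
    · intro x
      rw [List.mem_append, PySem.List.mem_pyRange_one, iht.2 x, pvCov_cons]
      constructor <;> rintro (h | h)
      · exact Or.inl ⟨h.1, by omega⟩
      · exact Or.inr h
      · exact Or.inl ⟨h.1, by omega⟩
      · exact Or.inr h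

-- ===== VERDICT (by name: the statement is the Claim_ definition above) =====
theorem parse_id_range_spec : Claim_equal_parse_id_range := by
  intro value _ hpre
  unfold Pre_parse_id_range at hpre
  unfold Spec_parse_id_range
  obtain ⟨ids', acc', hA, hB, hnd, hmem, hle⟩ :=
    pvParseJoin ((PySem.Str.split? value ",").getD []) PySem.Set.empty []
      hpre (by simp [PySem.Set.empty]) (by simp [PySem.Set.empty, pvCov_nil]) (by simp)
  have hAeq : parse_id_range value = PySem.List.sorted ids' (fun x => x) false := by
    unfold parse_id_range; rw [hA]
  have hBeq : parse_id_range_alt value =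
      ((PySem.List.sorted2 acc' (fun p => p.1) (fun p => p.2) false).foldl
        pvBMergeStep []).reverse.foldl
        (fun r p => r ++ PySem.List.pyRange p.1 (p.2 + 1) 1) [] := by
    unfold parse_id_range_alt; rw [hB]
  rw [hAeq, hBeq]
  -- properties of the sorted interval list
  set sIvs := PySem.List.sorted2 acc' (fun p => p.1) (fun p => p.2) false with hsIvs
  have hperm : sIvs.Perm acc' := PySem.List.sorted2_perm _ _ _ _
  have hsle : ∀ p ∈ sIvs, p.1 ≤ p.2 := fun p hp => hle p (hperm.mem_iff.mp hp)
  have hspw : sIvs.Pairwise (fun a b => a.1 ≤ b.1) := pvSorted2_pairwise_fst _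
  -- merge
  obtain ⟨hmle, hmpw, hmcov⟩ := pvMergeGo sIvs [] hsle hspw (by simp) (by simp) (by simp)
  set mrev := sIvs.foldl pvBMergeStep [] with hmrev
  -- emission over the reversed chain
  have hrle : ∀ p ∈ mrev.reverse, p.1 ≤ p.2 := fun p hp => hmle p (List.mem_reverse.mp hp)
  have hrpw : mrev.reverse.Pairwise (fun a b => a.2 + 1 < b.1) :=
    (List.pairwise_reverse).mpr hmpw
  obtain ⟨hepw, hemem⟩ := pvEmit mrev.reverse hrle hrpw
  rw [PySem.List.foldl_append_eq_flatMap, List.nil_append]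
  -- the emitted list is a strictly increasing enumeration of A's set
  refine PySem.List.sorted_eq_of_perm_of_pairwise_lt _ _ _ ?_ hepw
  refine (List.perm_ext_iff_of_nodup (hepw.imp ne_of_lt) hnd).mpr ?_
  intro x
  rw [hemem x, hmem x, pvCov_of_perm (List.reverse_perm mrev) x, hmcov x]
  simp only [pvCov_nil, false_or]
  exact pvCov_of_perm hperm x
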